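-- pv_equiv track=rewrite | github.com/fanzhangg/gomoku-ai | score_counter.py | eval_solid_chain
-- ===== SOURCE A (Python) =====
-- def eval_solid_chain(chain: [int], id: int, oppo: int)->int:
--     is_alive = True
--     length = 0
--
--     for x in chain:
--         if x == oppo:
--             is_alive = False
--         elif x == id:
--             length += 1
--
--     return get_score(length, is_alive)
--
-- def get_score(length: int, is_alive: bool)->int:
--     if length > 5:
--         return 100000
--     if length < 1:
--         return 0
--     return scores_dict[length][is_alive]
--
-- scores_dict = {
--     1: {False: 0, True: 10},
--     2: {False: 10, True: 100},
--     3: {False: 100, True: 1000},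
--     4: {False: 1000, True: 10000},
--     5: {False: 100000, True: 100000}
-- }
-- ===== SOURCE B (Python) =====
-- def _summary(chain, id, oppo):
--     # divide and conquer: (count of id stones not pre-empted by oppo, chain has no oppo)
--     n = len(chain)
--     if n == 0:
--         return 0, True
--     if n == 1:
--         x = chain[0]
--         if x == oppo:
--             return 0, False
--         return (1 if x == id else 0), True
--     left = _summary(chain[:n // 2], id, oppo)
--     right = _summary(chain[n // 2:], id, oppo)
--     return left[0] + right[0], left[1] and right[1]
--
-- def eval_solid_chain(chain: [int], id: int, oppo: int) -> int:
--     length, alive = _summary(chain, id, oppo)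
--     if length >= 5:
--         return 100000
--     eff = length if alive else length - 1
--     return 10 ** eff if eff >= 1 else 0
-- ===== Notes on version B (the rewrite author's own statement) =====
-- stated objective: alternative
-- what changed: Replaces A's fused left-to-right state-machine loop plus scores_dict table lookup with a divide-and-conquer summary (split the chain in half, combine counts with + and aliveness with and) fed into a closed-form arithmetic score (10**eff with a -1 penalty when dead) instead of the dict table.
import Mathlib
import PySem

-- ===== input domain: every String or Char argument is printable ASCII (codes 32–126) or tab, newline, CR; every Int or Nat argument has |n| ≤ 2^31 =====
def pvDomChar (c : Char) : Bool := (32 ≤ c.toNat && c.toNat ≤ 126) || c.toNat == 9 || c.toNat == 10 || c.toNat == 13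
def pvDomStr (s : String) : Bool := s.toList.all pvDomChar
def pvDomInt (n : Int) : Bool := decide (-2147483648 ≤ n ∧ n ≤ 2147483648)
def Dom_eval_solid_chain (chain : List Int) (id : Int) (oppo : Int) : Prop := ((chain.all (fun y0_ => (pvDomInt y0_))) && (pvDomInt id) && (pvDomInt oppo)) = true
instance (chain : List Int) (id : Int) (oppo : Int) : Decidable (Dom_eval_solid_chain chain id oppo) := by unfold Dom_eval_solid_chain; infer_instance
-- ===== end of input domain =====

-- B replaces A's fused loop + scores_dict table by a divide-and-conquer summary of the
-- chain combined with a closed-form arithmetic score; objective: alternative.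

-- ===== PORT A =====
def scores_dict : PySem.Dict Int (PySem.Dict Bool Int) :=
  PySem.Dict.ofList
    [(1, PySem.Dict.ofList [(false, 0), (true, 10)]),
     (2, PySem.Dict.ofList [(false, 10), (true, 100)]),
     (3, PySem.Dict.ofList [(false, 100), (true, 1000)]),
     (4, PySem.Dict.ofList [(false, 1000), (true, 10000)]),
     (5, PySem.Dict.ofList [(false, 100000), (true, 100000)])]

-- get_score; the getD defaults are unreachable because 1 ≤ length ≤ 5 guarantees both keys exist.
def get_score (length : Int) (is_alive : Bool) : Int :=
  if length > 5 then 100000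
  else if length < 1 then 0
  else PySem.Dict.getD (PySem.Dict.getD scores_dict length PySem.Dict.empty) is_alive 0

def eval_solid_chain (chain : List Int) (id : Int) (oppo : Int) : Int :=
  let st := chain.foldl
    (fun (p : Bool × Int) x =>
      if x = oppo then (false, p.2)
      else if x = id then (p.1, p.2 + 1)
      else p)
    (true, 0)
  get_score st.2 st.1

-- ===== PORT B =====
-- _summary: divide and conquer over the chain (chain[:n//2] / chain[n//2:] via take/drop;
-- n//2 on the nonnegative length is exactly Nat division).
def pvSummary (chain : List Int) (id : Int) (oppo : Int) : Int × Bool :=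
  match chain with
  | [] => (0, true)
  | [x] => if x = oppo then (0, false) else ((if x = id then 1 else 0), true)
  | x :: y :: rest =>
    let n := (x :: y :: rest).length
    let left := pvSummary ((x :: y :: rest).take (n / 2)) id oppo
    let right := pvSummary ((x :: y :: rest).drop (n / 2)) id oppo
    (left.1 + right.1, left.2 && right.2)
termination_by chain.length
decreasing_by
  · simp; omega
  · simp; omega

-- 10 ** eff with 1 ≤ eff: the exponent is nonnegative, so eff.toNat is exact.
def eval_solid_chain_alt (chain : List Int) (id : Int) (oppo : Int) : Int :=
  let s := pvSummary chain id oppo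
  if s.1 ≥ 5 then 100000
  else
    let eff := if s.2 then s.1 else s.1 - 1
    if eff ≥ 1 then (10 : Int) ^ eff.toNat else 0

-- ===== PRECONDITION & SPEC =====
def Spec_eval_solid_chain (chain : List Int) (id : Int) (oppo : Int) (out : Int) : Prop := out = eval_solid_chain_alt chain id oppo
instance (chain : List Int) (id : Int) (oppo : Int) (out : Int) : Decidable (Spec_eval_solid_chain chain id oppo out) := by unfold Spec_eval_solid_chain; infer_instance

-- ===== CLAIM (what is proved, stated in full; the proofs are below) =====
def Claim_equal_eval_solid_chain : Prop := ∀ (chain : List Int) (id : Int) (oppo : Int), Dom_eval_solid_chain chain id oppo → Spec_eval_solid_chain chain id oppo (eval_solid_chain chain id oppo)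

-- ===== LEMMAS AND PROOFS =====
-- the common semantics both programs compute: stones counted and aliveness
def pvCnt (chain : List Int) (id : Int) (oppo : Int) : Int :=
  ((chain.filter (fun x => decide (x ≠ oppo) && decide (x = id))).length : Int)

theorem pvCnt_append (l r : List Int) (id oppo : Int) :
    pvCnt (l ++ r) id oppo = pvCnt l id oppo + pvCnt r id oppo := by
  simp [pvCnt]

theorem not_contains_append (l r : List Int) (o : Int) :
    (!l.contains o && !r.contains o) = !(l ++ r).contains o := by
  simp

theorem pvCnt_nonneg (chain : List Int) (id oppo : Int) : 0 ≤ pvCnt chain id oppo := by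
  simp [pvCnt]

-- A's loop from any start state
theorem loop_eval (id oppo : Int) :
    ∀ (l : List Int) (b : Bool) (n : Int),
      l.foldl
        (fun (p : Bool × Int) x =>
          if x = oppo then (false, p.2)
          else if x = id then (p.1, p.2 + 1)
          else p)
        (b, n)
      = (b && !l.contains oppo, n + pvCnt l id oppo) := by
  intro l
  induction l with
  | nil => intro b n; simp [pvCnt]
  | cons x xs ih =>
    intro b n
    simp only [List.foldl_cons, List.contains_cons]
    by_cases hxo : x = oppo
    · rw [if_pos hxo, ih]
      simp [pvCnt, hxo]
    · have h1 : (oppo == x) = false := beq_eq_false_iff_ne.mpr (Ne.symm hxo)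
      by_cases hxi : x = id
      · rw [if_neg hxo, if_pos hxi, ih]
        simp only [Prod.mk.injEq]
        constructor
        · simp [h1]
        · subst hxi
          simp [pvCnt, hxo]
          ring
      · rw [if_neg hxo, if_neg hxi, ih]
        simp [pvCnt, h1, hxo, hxi]

-- B's divide-and-conquer computes the same summary
theorem summary_eq (id oppo : Int) : ∀ (chain : List Int),
    pvSummary chain id oppo = (pvCnt chain id oppo, !chain.contains oppo) := by
  intro chain
  induction chain using pvSummary.induct (id := id) (oppo := oppo) with
  | case1 => simp [pvSummary, pvCnt]
  | case2 => simp [pvSummary, pvCnt]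
  | case3 x hxo =>
    have h1 : (oppo == x) = false := beq_eq_false_iff_ne.mpr (Ne.symm hxo)
    by_cases hxi : x = id
    · subst hxi
      simp [pvSummary, pvCnt, hxo, Ne.symm hxo]
    · simp [pvSummary, pvCnt, hxo, hxi, Ne.symm hxo]
  | case4 x y rest n ihl ihr =>
    rw [pvSummary]
    simp only [show n = (x :: y :: rest).length from rfl] at ihl ihr
    simp only [ihl, ihr]
    have hsplit : (x :: y :: rest).take ((x :: y :: rest).length / 2)
        ++ (x :: y :: rest).drop ((x :: y :: rest).length / 2) = x :: y :: rest :=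
      List.take_append_drop _ _
    simp only [Prod.mk.injEq]
    constructor
    · rw [← pvCnt_append, hsplit]
    · rw [not_contains_append, hsplit]

-- the table lookup equals the closed-form score for nonnegative lengths
theorem score_eq (l : Int) (hl : 0 ≤ l) (a : Bool) :
    get_score l a
      = (if l ≥ 5 then 100000
         else
           let eff := if a then l else l - 1
           if eff ≥ 1 then (10 : Int) ^ eff.toNat else 0) := by
  by_cases h5 : l ≥ 5
  · rw [if_pos h5]
    by_cases h6 : l > 5
    · simp [get_score, h6]
    · have : l = 5 := by omega
      subst this
      cases a <;> decide
  · rw [if_neg h5]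
    have : l < 5 := by omega
    interval_cases l <;> cases a <;> decide

-- ===== VERDICT (by name: the statement is the Claim_ definition above) =====
theorem eval_solid_chain_spec : Claim_equal_eval_solid_chain := by
  intro chain id oppo _
  unfold Spec_eval_solid_chain eval_solid_chain eval_solid_chain_alt
  rw [loop_eval id oppo chain true 0, summary_eq id oppo chain]
  simp only [Bool.true_and, zero_add]
  exact score_eq (pvCnt chain id oppo) (pvCnt_nonneg chain id oppo) (!chain.contains oppo)
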